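-- pv_equiv track=rewrite | github.com/miguelfradinho/adventofcode_23 | sol_snake/day_9.py | extrapolate_left
-- ===== SOURCE A (Python) =====
-- from collections import deque
--
-- def extrapolate_left(report : deque[list[int]]) -> int:
--     # turn the report into deques so we can use append left
--     report_but_deques = [deque(i) for i in report]
--     # le switcheroo to make the iteration easy
--     report_but_deques.reverse()
--     # initialize
--     last_val = 0
--     for i in range(len(report_but_deques)):
--         curr_line = report_but_deques[i]
--         next_val = curr_line[0]
--         predicted = next_val - last_val
--         curr_line.appendleft(predicted)
--         last_val = predicted
--
--     report_but_deques.reverse()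
--     predicted_value = report_but_deques[0][0]
--     return predicted_value
-- ===== SOURCE B (Python) =====
-- def extrapolate_left(report):
--     # alternating sum of the first element of each line: r0[0] - r1[0] + r2[0] - ...
--     rows = iter(report)
--     total = next(rows)[0]
--     sign = -1
--     for row in rows:
--         total += sign * row[0]
--         sign = -sign
--     return total
-- ===== Notes on version B (the rewrite author's own statement) =====
-- stated objective: simpler
-- what changed: Replaces building reversed deques with appendleft and back-substitution by a single forward pass computing the alternating sum of each line's first element.
import Mathlib
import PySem

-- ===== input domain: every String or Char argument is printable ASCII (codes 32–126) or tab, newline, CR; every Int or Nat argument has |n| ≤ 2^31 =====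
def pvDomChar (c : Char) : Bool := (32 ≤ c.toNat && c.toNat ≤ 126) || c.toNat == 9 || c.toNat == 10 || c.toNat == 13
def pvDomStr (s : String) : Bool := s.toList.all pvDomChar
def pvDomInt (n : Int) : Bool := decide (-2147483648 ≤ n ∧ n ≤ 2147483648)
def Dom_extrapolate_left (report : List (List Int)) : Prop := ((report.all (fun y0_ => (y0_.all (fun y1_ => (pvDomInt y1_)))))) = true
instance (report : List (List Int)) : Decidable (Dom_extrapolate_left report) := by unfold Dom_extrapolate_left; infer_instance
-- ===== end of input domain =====

-- ===== PORT A =====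
-- Header: B replaces A's reversed-deque back-substitution with a single alternating-sum pass (simpler).
-- A raises IndexError on an empty report or a line that is empty; Pre_ excludes exactly those.
def extrapolate_left (report : List (List Int)) : Int :=
  -- report_but_deques = [deque(i) for i in report]; report_but_deques.reverse()
  let rbd := (report.map (fun i => i)).reverse
  -- for i in range(len(...)): predicted = curr_line[0] - last_val; curr_line.appendleft(predicted)
  let res := rbd.foldl (fun (st : List (List Int) × Int) curr =>
      let next_val := curr.headD 0   -- curr_line[0]; Pre_ excludes empty lines (IndexError)
      let predicted := next_val - st.2
      (st.1 ++ [predicted :: curr], predicted)) ([], 0)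
  -- report_but_deques.reverse(); return report_but_deques[0][0]
  ((res.1.reverse.headD []).headD 0)

-- ===== PORT B =====
def extrapolate_left_alt (report : List (List Int)) : Int :=
  match report with
  | [] => 0   -- Python's next(rows) raises here; excluded by Pre_
  | r0 :: rest =>
    (rest.foldl (fun (st : Int × Int) row => (st.1 + st.2 * row.headD 0, -st.2))
      (r0.headD 0, -1)).1

-- ===== PRECONDITION & SPEC =====
-- Pre_ excludes exactly the inputs where A raises IndexError: an empty report, or a report containing an empty line.
def Pre_extrapolate_left (report : List (List Int)) : Prop :=
  report ≠ [] ∧ ∀ l ∈ report, l ≠ []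
instance (report : List (List Int)) : Decidable (Pre_extrapolate_left report) := by unfold Pre_extrapolate_left; infer_instance
def pvWitness_extrapolate_left : List (List Int) := [[1, 3, 5], [2, 2], [0]]
def Spec_extrapolate_left (report : List (List Int)) (out : Int) : Prop := out = extrapolate_left_alt report
instance (report : List (List Int)) (out : Int) : Decidable (Spec_extrapolate_left report out) := by unfold Spec_extrapolate_left; infer_instance

-- ===== CLAIM (what is proved, stated in full; the proofs are below) =====
def Claim_equal_extrapolate_left : Prop := ∀ (report : List (List Int)), Dom_extrapolate_left report → Pre_extrapolate_left report → Spec_extrapolate_left report (extrapolate_left report)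

-- ===== LEMMAS AND PROOFS =====

-- G rest = value of A's running last_val contribution from the lines below the top one.
def pvG (l : List (List Int)) : Int := l.foldr (fun c v => c.headD 0 - v) 0

-- the second component of A's fold ignores the accumulated list and is a plain fold
theorem pvA_snd (l : List (List Int)) (acc : List (List Int)) (v : Int) :
    (l.foldl (fun (st : List (List Int) × Int) curr =>
      (st.1 ++ [(curr.headD 0 - st.2) :: curr], curr.headD 0 - st.2)) (acc, v)).2
    = l.foldl (fun w curr => curr.headD 0 - w) v := by
  induction l generalizing acc v with
  | nil => rfl
  | cons c l ih => simpa using ih _ _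

-- the accumulated list's last line starts with the final predicted value
theorem pvA_fst (l : List (List Int)) (acc : List (List Int)) (v : Int) (h : l ≠ []) :
    ∃ t rest, (l.foldl (fun (st : List (List Int) × Int) curr =>
      (st.1 ++ [(curr.headD 0 - st.2) :: curr], curr.headD 0 - st.2)) (acc, v)).1.reverse
      = (((l.foldl (fun (st : List (List Int) × Int) curr =>
      (st.1 ++ [(curr.headD 0 - st.2) :: curr], curr.headD 0 - st.2)) (acc, v)).2) :: t) :: rest := by
  induction l generalizing acc v with
  | nil => exact absurd rfl h
  | cons c l ih =>
    cases l with
    | nil => exact ⟨c, acc.reverse, by simp⟩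
    | cons d l' =>
      rw [List.foldl_cons]
      exact ih _ _ (by simp)

-- B's fold computes t + s * pvG
theorem pvB_fold (l : List (List Int)) (t s : Int) :
    (l.foldl (fun (st : Int × Int) row => (st.1 + st.2 * row.headD 0, -st.2)) (t, s)).1
    = t + s * pvG l := by
  induction l generalizing t s with
  | nil => simp [pvG]
  | cons c l ih => rw [List.foldl_cons, ih]; simp [pvG]; ring

theorem pvA_eval (r0 : List Int) (rest : List (List Int)) :
    extrapolate_left (r0 :: rest) = r0.headD 0 - pvG rest := by
  have hs := pvA_snd ((r0 :: rest).reverse) [] 0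
  obtain ⟨t, r, hf⟩ := pvA_fst ((r0 :: rest).reverse) [] 0 (by simp)
  unfold extrapolate_left
  simp only [List.map_id_fun', id]
  rw [hf]
  simp only [List.headD_cons, hs]
  have : (r0 :: rest).reverse = rest.reverse ++ [r0] := by simp
  rw [this, List.foldl_append, List.foldl_reverse]
  simp [pvG]


-- ===== VERDICT (by name: the statement is the Claim_ definition above) =====
theorem extrapolate_left_spec : Claim_equal_extrapolate_left := by
  intro report _ _
  unfold Spec_extrapolate_left
  cases report with
  | nil => rfl
  | cons r0 rest =>
    rw [pvA_eval]
    show _ = (List.foldl (fun (st : Int × Int) row => (st.1 + st.2 * row.headD 0, -st.2)) (r0.headD 0, -1) rest).1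
    rw [pvB_fold]
    ring
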